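-- pv_equiv track=rewrite | github.com/jaaack-wang/notes | code/sent_embdder.py | __get_knn_class
-- ===== SOURCE A (Python) =====
-- def __get_knn_class(sentences, idx):
--
--     out = dict()
--     for ix, c in enumerate(idx):
--         key = f"Class {c}"
--         if key not in out:
--             out[key] = [sentences[ix]]
--         else:
--             out[key].append(sentences[ix])
--
--     return out
-- ===== SOURCE B (Python) =====
-- def __get_knn_class(sentences, idx):
--     return {f"Class {c}": [s for s, d in zip(sentences, idx) if d == c]
--             for c in dict.fromkeys(idx)}
-- ===== Notes on version B (the rewrite author's own statement) =====
-- stated objective: idiomatic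
-- what changed: Instead of one pass that membership-tests and appends into a dict, B deduplicates the class indices once (dict.fromkeys) and builds the whole result as a dict comprehension with one filtering scan of zip(sentences, idx) per distinct class.
import Mathlib
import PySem

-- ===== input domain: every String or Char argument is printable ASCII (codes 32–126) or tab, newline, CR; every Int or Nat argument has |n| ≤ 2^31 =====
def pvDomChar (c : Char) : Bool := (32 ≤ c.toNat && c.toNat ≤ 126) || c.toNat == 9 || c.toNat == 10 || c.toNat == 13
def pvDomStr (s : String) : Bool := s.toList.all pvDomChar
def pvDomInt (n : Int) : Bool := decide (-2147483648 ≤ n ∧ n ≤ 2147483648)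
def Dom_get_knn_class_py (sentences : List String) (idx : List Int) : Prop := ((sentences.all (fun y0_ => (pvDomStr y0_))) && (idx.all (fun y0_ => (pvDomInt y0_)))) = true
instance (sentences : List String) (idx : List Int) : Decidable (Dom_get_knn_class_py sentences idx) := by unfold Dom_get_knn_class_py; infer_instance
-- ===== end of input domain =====

-- B replaces A's single membership-test-and-append dict pass by an ordered dedup of the
-- class indices followed by a dict comprehension with one filtering scan per distinct class
-- (objective: idiomatic; not faster).


-- ===== PORT A =====
-- the key f"Class {c}" (both Pythons build this very string; str(c) = PySem.Int.toChars c)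
def pvKey (c : Int) : String := String.ofList (['C','l','a','s','s',' '] ++ PySem.Int.toChars c)

def get_knn_class_py (sentences : List String) (idx : List Int) : List (String × List String) :=
  ((PySem.List.enumerate idx).foldl (fun out p =>
      let key : String := pvKey p.2
      match out.get? key with
      | none   => out.insert key [(PySem.List.pyGet? sentences p.1).getD ""]
      | some l => out.insert key (l ++ [(PySem.List.pyGet? sentences p.1).getD ""]))
    PySem.Dict.empty).items

-- ===== PORT B =====
def get_knn_class_py_alt (sentences : List String) (idx : List Int) : List (String × List String) :=
  ((PySem.List.dedup idx).foldl (fun d c =>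
      d.insert (pvKey c) (((sentences.zip idx).filter (fun p => p.2 == c)).map (fun p => p.1)))
    PySem.Dict.empty).items

-- ===== PRECONDITION & SPEC =====
-- Pre_ excludes exactly the inputs where A raises IndexError: sentences[ix] with idx longer than sentences.
def Pre_get_knn_class_py (sentences : List String) (idx : List Int) : Prop :=
  idx.length ≤ sentences.length
instance (sentences : List String) (idx : List Int) : Decidable (Pre_get_knn_class_py sentences idx) := by unfold Pre_get_knn_class_py; infer_instance

def pvWitness_get_knn_class_py : List String × List Int := (["a b", "c", "a b"], [1, 0, 1])

def Spec_get_knn_class_py (sentences : List String) (idx : List Int) (out : List (String × List String)) : Prop := out = get_knn_class_py_alt sentences idx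
instance (sentences : List String) (idx : List Int) (out : List (String × List String)) : Decidable (Spec_get_knn_class_py sentences idx out) := by unfold Spec_get_knn_class_py; infer_instance

-- ===== CLAIM (what is proved, stated in full; the proofs are below) =====
def Claim_equal_get_knn_class_py : Prop := ∀ (sentences : List String) (idx : List Int), Dom_get_knn_class_py sentences idx → Pre_get_knn_class_py sentences idx → Spec_get_knn_class_py sentences idx (get_knn_class_py sentences idx)

-- ===== LEMMAS AND PROOFS =====

-- decimal decoding, to show that str(n) is injective
def pvDec (a : Nat) (l : List Char) : Nat := l.foldl (fun a c => a * 10 + (c.toNat - 48)) a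

lemma pvDec_digitChar {m : Nat} (h : m < 10) : (Nat.digitChar m).toNat - 48 = m := by
  interval_cases m <;> decide

lemma toDigitsCore_succ (f n : Nat) (acc : List Char) :
    Nat.toDigitsCore 10 (f+1) n acc =
      if n / 10 = 0 then (n % 10).digitChar :: acc
      else Nat.toDigitsCore 10 f (n / 10) ((n % 10).digitChar :: acc) := by
  rw [Nat.toDigitsCore]

lemma pvDec_toDigitsCore : ∀ (f n : Nat) (acc : List Char), n < 10 ^ f →
    pvDec 0 (Nat.toDigitsCore 10 f n acc) = pvDec n acc := by
  intro f
  induction f with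
  | zero =>
    intro n acc h
    have h0 : n = 0 := by simpa using h
    subst h0
    rfl
  | succ f ih =>
    intro n acc h
    rw [toDigitsCore_succ]
    split_ifs with h0
    · show pvDec (0 * 10 + ((n % 10).digitChar.toNat - 48)) acc = pvDec n acc
      rw [pvDec_digitChar (by omega)]
      congr 1
      omega
    · rw [ih (n / 10) _ (by rw [pow_succ] at h; omega)]
      show pvDec (n / 10 * 10 + ((n % 10).digitChar.toNat - 48)) acc = pvDec n acc
      rw [pvDec_digitChar (by omega)]
      congr 1
      omega

lemma pvDec_toDigits (n : Nat) : pvDec 0 (Nat.toDigits 10 n) = n := by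
  have := pvDec_toDigitsCore (n + 1) n [] (by
    calc n < 10 ^ n := Nat.lt_pow_self (by omega)
    _ ≤ 10 ^ (n + 1) := Nat.pow_le_pow_right (by omega) (by omega))
  simpa [Nat.toDigits, pvDec] using this

lemma toDigits_inj {a b : Nat} (h : Nat.toDigits 10 a = Nat.toDigits 10 b) : a = b := by
  have := pvDec_toDigits a; rw [h, pvDec_toDigits] at this; omega

lemma mem_toDigitsCore : ∀ (f n : Nat) (acc : List Char) (c : Char),
    c ∈ Nat.toDigitsCore 10 f n acc → c ∈ acc ∨ (48 ≤ c.toNat ∧ c.toNat ≤ 57) := by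
  intro f
  induction f with
  | zero => intro n acc c h; exact Or.inl h
  | succ f ih =>
    intro n acc c h
    rw [toDigitsCore_succ] at h
    have hd : 48 ≤ (Nat.digitChar (n % 10)).toNat ∧ (Nat.digitChar (n % 10)).toNat ≤ 57 := by
      have : n % 10 < 10 := by omega
      interval_cases h : n % 10 <;> simp_all <;> decide
    split_ifs at h with h0
    · rcases List.mem_cons.mp h with h1 | h1
      · exact Or.inr (h1 ▸ hd)
      · exact Or.inl h1
    · rcases ih _ _ _ h with h1 | h1
      · rcases List.mem_cons.mp h1 with h2 | h2
        · exact Or.inr (h2 ▸ hd)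
        · exact Or.inl h2
      · exact Or.inr h1

lemma toChars_inj : Function.Injective PySem.Int.toChars := by
  intro a b h
  unfold PySem.Int.toChars at h
  have h45 : ('-' : Char).toNat = 45 := by decide
  split_ifs at h with ha hb hb
  · have := toDigits_inj (List.cons.inj h).2
    omega
  · exfalso
    have hm : ('-' : Char) ∈ Nat.toDigits 10 b.toNat := h ▸ List.mem_cons_self
    rcases mem_toDigitsCore _ _ _ _ hm with h1 | h1
    · exact (List.not_mem_nil h1)
    · omega
  · exfalso
    have hm : ('-' : Char) ∈ Nat.toDigits 10 a.toNat := h ▸ List.mem_cons_self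
    rcases mem_toDigitsCore _ _ _ _ hm with h1 | h1
    · exact (List.not_mem_nil h1)
    · omega
  · have := toDigits_inj h
    omega

lemma pvKey_inj : Function.Injective pvKey := by
  intro a b h
  unfold pvKey at h
  have h2 := congrArg String.toList h
  rw [String.toList_ofList, String.toList_ofList] at h2
  exact toChars_inj (List.append_cancel_left h2)

-- a dict with Nodup keys is its key list paired with its getD values
lemma items_eq_keys_map {ν : Type} (d : PySem.Dict String ν) (h : d.keys.Nodup) (v0 : ν) :
    d.items = d.keys.map (fun k => (k, d.getD k v0)) := by
  apply List.ext_getElem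
  · simp [PySem.Dict.keys]
  · intro i h1 h2
    have hk : d.keys[i]'(by simpa [PySem.Dict.keys] using h1) = d.items[i].1 := by
      simp [PySem.Dict.keys]
    simp only [List.getElem_map, hk]
    have hmem : (d.items[i].1, d.items[i].2) ∈ d.items := by
      simp only [Prod.mk.eta]
      exact List.getElem_mem h1
    rw [PySem.Dict.getD_of_mem_items d hmem h v0]

-- Set.ofList commutes with mapping an injective function
lemma ofList_map_inj {α β : Type} [BEq α] [LawfulBEq α] [BEq β] [LawfulBEq β]
    (f : α → β) (hf : Function.Injective f) (xs : List α) :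
    PySem.Set.ofList (xs.map f) = (PySem.Set.ofList xs).map f := by
  induction xs using List.reverseRecOn with
  | nil => rfl
  | append_singleton ys x ih =>
    rw [List.map_append, List.map_singleton]
    rw [PySem.Set.ofList_eq_foldl, PySem.Set.ofList_eq_foldl, List.foldl_append, List.foldl_append]
    rw [← PySem.Set.ofList_eq_foldl, ← PySem.Set.ofList_eq_foldl, ih]
    simp only [List.foldl_cons, List.foldl_nil]
    have hmem : f x ∈ (PySem.Set.ofList ys).map f ↔ x ∈ PySem.Set.ofList ys := by
      constructor
      · intro hm
        rcases List.mem_map.mp hm with ⟨a, ha, hax⟩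
        rwa [← hf hax]
      · intro hm; exact List.mem_map.mpr ⟨x, hm, rfl⟩
    have hc : List.contains ((PySem.Set.ofList ys).map f) (f x) = List.contains (PySem.Set.ofList ys) x := by
      by_cases hm : x ∈ PySem.Set.ofList ys <;>
        simp [hm, hmem]
    unfold PySem.Set.add PySem.Set.contains
    rw [hc]
    split_ifs <;> simp

-- under the precondition, A's enumerate/pyGet? traversal is exactly zip(sentences, idx)
lemma enum_map_zip (sentences : List String) (idx : List Int) (h : idx.length ≤ sentences.length) :
    (PySem.List.enumerate idx).map (fun p => ((PySem.List.pyGet? sentences p.1).getD "", p.2)) = sentences.zip idx := by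
  apply List.ext_getElem
  · simp [PySem.List.length_enumerate]
    omega
  · intro i h1 h2
    simp only [List.getElem_map]
    rw [PySem.List.getElem_enumerate]
    simp only [zero_add]
    rw [PySem.List.pyGet?_natCast]
    have hi : i < sentences.length := by
      simp [PySem.List.length_enumerate] at h1; omega
    rw [List.getElem?_eq_getElem hi]
    simp [List.getElem_zip]

theorem get_knn_class_main (sentences : List String) (idx : List Int) (h : idx.length ≤ sentences.length) :
    get_knn_class_py sentences idx = get_knn_class_py_alt sentences idx := by
  unfold get_knn_class_py get_knn_class_py_alt
  -- Step 1: A's loop body is a `modify`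
  have hbody : ∀ (out : PySem.Dict String (List String)) (p : Int × Int), p ∈ PySem.List.enumerate idx →
      (let key : String := pvKey p.2
       match out.get? key with
       | none   => out.insert key [(PySem.List.pyGet? sentences p.1).getD ""]
       | some l => out.insert key (l ++ [(PySem.List.pyGet? sentences p.1).getD ""])) =
      out.modify (pvKey p.2) [] (fun l => l ++ [(PySem.List.pyGet? sentences p.1).getD ""]) := by
    intro out p _
    simp only [PySem.Dict.modify, PySem.Dict.getD_eq_get?_getD]
    cases hg : out.get? (pvKey p.2) <;> simp
  rw [PySem.List.foldl_congr_mem _ _ _ _ hbody]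
  -- Step 2: reindex A's fold over zip(sentences, idx)
  have hfold1 :
      (PySem.List.enumerate idx).foldl
        (fun out p => out.modify (pvKey p.2) [] (fun l => l ++ [(PySem.List.pyGet? sentences p.1).getD ""]))
        PySem.Dict.empty
      = ((PySem.List.enumerate idx).map (fun p => ((PySem.List.pyGet? sentences p.1).getD "", p.2))).foldl
          (fun out q => out.modify (pvKey q.2) [] (fun l => l ++ [q.1])) PySem.Dict.empty := by
    rw [List.foldl_map]
  rw [hfold1, enum_map_zip sentences idx h]
  -- Step 3: rekey the fold to (key, value) pairs
  have hfold2 :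
      (sentences.zip idx).foldl
        (fun out q => out.modify (pvKey q.2) [] (fun l => l ++ [q.1])) PySem.Dict.empty
      = ((sentences.zip idx).map (fun q => (pvKey q.2, q.1))).foldl
          (fun out r => out.modify r.1 [] (fun l => l ++ [r.2])) PySem.Dict.empty := by
    rw [List.foldl_map]
  rw [hfold2]
  set l' := (sentences.zip idx).map (fun q => (pvKey q.2, q.1)) with hl'
  set D := l'.foldl (fun out r => out.modify r.1 [] (fun l => l ++ [r.2])) PySem.Dict.empty with hD
  -- keys of D: the distinct classes, in first-appearance order
  have h1 : l'.map Prod.fst = idx.map pvKey := by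
    conv_rhs => rw [← List.map_snd_zip h]
    rw [hl']
    simp [List.map_map, Function.comp]
  have hkeys : D.keys = (PySem.List.dedup idx).map pvKey := by
    rw [hD]
    rw [PySem.Dict.keys_foldl_modify_key l' Prod.fst [] (fun _ r => fun l => l ++ [r.2]) PySem.Dict.empty]
    rw [h1]
    have h2 : PySem.Set.update (PySem.Dict.empty : PySem.Dict String (List String)).keys (idx.map pvKey) = PySem.Set.ofList (idx.map pvKey) := rfl
    rw [h2, ofList_map_inj pvKey pvKey_inj]
    simp [PySem.List.dedup_eq_ofList]
  have hnodup : D.keys.Nodup := by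
    rw [hD]
    exact PySem.Dict.nodup_keys_foldl_modify_key l' Prod.fst [] _ _ PySem.Dict.nodup_keys_empty
  have hBnodup : ((PySem.List.dedup idx).map pvKey).Nodup :=
    (PySem.List.nodup_dedup idx).map pvKey_inj
  have hfresh : ∀ a ∈ PySem.List.dedup idx,
      (PySem.Dict.empty : PySem.Dict String (List String)).contains (pvKey a) = false := by
    intro a _
    simp [PySem.Dict.contains_empty]
  rw [PySem.Dict.items_foldl_insert_fresh _ _ _ _ hfresh hBnodup]
  rw [items_eq_keys_map D hnodup [], hkeys, List.map_map]
  rw [show (PySem.Dict.empty : PySem.Dict String (List String)).items = [] from rfl, List.nil_append]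
  apply List.map_congr_left
  intro c hc
  have hget : D.getD (pvKey c) [] = ((sentences.zip idx).filter (fun p => p.2 == c)).map (fun p => p.1) := by
    rw [hD, PySem.Dict.getD_foldl_modify_append l' PySem.Dict.empty (pvKey c)]
    rw [PySem.Dict.getD_empty, List.nil_append, hl', List.filter_map, List.map_map]
    have heq : ((fun r : String × String => r.1 == pvKey c) ∘ (fun q : String × ℤ => (pvKey q.2, q.1))) = (fun q : String × ℤ => q.2 == c) := by
      funext q
      by_cases hq : q.2 = c
      · simp [hq]
      · have hne : ¬ pvKey q.2 = pvKey c := fun h2 => hq (pvKey_inj h2)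
        simp [hq, hne]
    rw [heq]
    rfl
  simp only [Function.comp_apply, hget]

-- ===== VERDICT (by name: the statement is the Claim_ definition above) =====
theorem get_knn_class_py_spec : Claim_equal_get_knn_class_py := by
  intro sentences idx _ hpre
  unfold Spec_get_knn_class_py
  exact get_knn_class_main sentences idx hpre
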